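-- pv_equiv track=rewrite | github.com/YaRkyungmin/algorithm-practice | Programmers/이분 탐색/입국심사.py | solution
-- ===== SOURCE A (Python) =====
-- def solution(n, times):
--     times.sort()
--     min_time = times[0]
--     x = 0
--     times_len = len(times)
--     time_set = [0] * times_len
--     while n >= sum(time_set):
--         x += 1
--         compare_time = min_time * x
--         for i in range(times_len):
--             if times[i] <= compare_time:
--                 time_set[i] += 1
--             else:
--                 break
--     y = 0
--     while sum(time_set) > n:
--         time_set[y] -= 1
--         y += 1
--
--     z = times_len - 1
--
--     total_time = time_set[0] * times[0]
--
--     for i in range(1, times_len):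
--         if time_set[i] == 0:
--             break
--         if total_time < time_set[i] * times[i]:
--             total_time = time_set[i] * times[i]
--
--     return total_time
-- ===== SOURCE B (Python) =====
-- def solution(n, times):
--     # Computes A's value by binary search on the round counter instead of A's
--     # round-by-round incremental counting.  Sorts `times` in place like A.
--     # For n <= 0 nobody is waiting, so no time is needed (A instead returns
--     # -min(times) for n < 0 -- see the stated intended difference).
--     times.sort()
--     if n <= 0:
--         return 0
--     t0 = times[0]
--     L = len(times)
--     c = [-(-t // t0) for t in times]   # first round in which desk i starts counting
--
--     def S(X):
--         return sum(X - ci + 1 for ci in c if ci <= X)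
--
--     lo, hi = 1, c[-1] + n              # S(hi) > n is guaranteed
--     while lo < hi:
--         mid = (lo + hi) // 2
--         if S(mid) > n:
--             hi = mid
--         else:
--             lo = mid + 1
--     X = lo
--     counts = [max(0, X - ci + 1) for ci in c]
--     excess = sum(counts) - n
--     for y in range(excess):
--         counts[y] -= 1
--     total = counts[0] * times[0]
--     for i in range(1, L):
--         if counts[i] == 0:
--             break
--         total = max(total, counts[i] * times[i])
--     return total
-- ===== Notes on version B (the rewrite author's own statement) =====
-- stated objective: alternative
-- what changed: A finds the stopping round by simulating rounds one at a time with incremental per-desk counters; B returns 0 outright for n <= 0 and otherwise derives each desk's first active round by ceiling division, binary-searches the stopping round X on the closed-form cumulative count S(X), builds the counters directly from X, then applies the same trim/final-max steps (fewer rounds examined on the natural domain, but the timing family contains inputs outside it, so no speed is claimed).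
-- intended difference: For n < 0 (with -n <= len(times), and unless min(times) = 0 where both give 0) A returns -min(times), a meaningless negative total produced by its trim loop decrementing untouched counters; B returns 0, the intended answer when nobody is waiting. — e.g. on solution(-1, [2]): A returns -2, B returns 0
-- outside the precondition, e.g. on solution(1, [0, 3]): A returns 0, B raises ZeroDivisionError; on solution(-3, [1]): A raises IndexError, B returns 0
import Mathlib
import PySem

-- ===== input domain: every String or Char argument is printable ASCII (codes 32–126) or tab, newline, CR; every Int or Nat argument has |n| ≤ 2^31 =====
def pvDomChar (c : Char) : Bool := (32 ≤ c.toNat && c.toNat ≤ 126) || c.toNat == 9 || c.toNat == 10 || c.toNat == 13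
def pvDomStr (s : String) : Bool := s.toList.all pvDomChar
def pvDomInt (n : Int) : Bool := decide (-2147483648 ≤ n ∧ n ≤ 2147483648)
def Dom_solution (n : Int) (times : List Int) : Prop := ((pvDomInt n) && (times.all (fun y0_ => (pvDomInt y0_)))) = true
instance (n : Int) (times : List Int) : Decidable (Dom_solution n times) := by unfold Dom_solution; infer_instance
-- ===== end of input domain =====

-- B replaces A's round-by-round simulation of the counting loop by a binary search on the
-- closed-form cumulative count, keeping A's trim and final-max steps; both Pythons sort
-- `times` in place (the equivalence proved here is about the return value).


-- ===== PORT A =====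
-- inner `for i in range(times_len): if times[i] <= compare_time: time_set[i] += 1 else: break`,
-- walking the two (equal-length) lists in lockstep
def pvInnerA : List Int → List Int → Int → List Int
  | t :: ts, s :: ss, ct => if t ≤ ct then (s + 1) :: pvInnerA ts ss ct else s :: ss
  | _, ss, _ => ss

-- `while n >= sum(time_set): x += 1; compare_time = min_time * x; <inner for>` — fuel-bounded
-- (the fuel is only a totality guard: n.toNat + 2 steps always suffice under Pre_, see loopA_spec)
def pvLoopA (n t0 : Int) (times : List Int) : Nat → List Int → Int → List Int × Int
  | 0, ts, x => (ts, x)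
  | fuel + 1, ts, x =>
    if n ≥ ts.sum then
      pvLoopA n t0 times fuel (pvInnerA times ts (t0 * (x + 1))) (x + 1)
    else (ts, x)

-- `y = 0; while sum(time_set) > n: time_set[y] -= 1; y += 1` — `done` is the already-visited
-- prefix; where Python would raise IndexError (rest exhausted with the sum still > n) the
-- port returns `done` (such inputs are outside Pre_)
def pvTrimA : Int → List Int → List Int → List Int
  | _, done, [] => done  -- sum ≤ n: the loop is over; sum > n: Python raises IndexError
  | n, done, s :: tl =>
    if done.sum + (s :: tl).sum > n then pvTrimA n (done ++ [s - 1]) tl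
    else done ++ (s :: tl)

-- final `for i in range(1, times_len): if time_set[i] == 0: break; …` in lockstep
def pvFinA : List Int → List Int → Int → Int
  | s :: ss, t :: ts, total =>
    if s = 0 then total
    else pvFinA ss ts (if total < s * t then s * t else total)
  | _, _, total => total

def solution (n : Int) (times : List Int) : Int :=
  match PySem.List.sorted times (fun x => x) false with
  | [] => 0  -- Python raises IndexError on times[0]; excluded by Pre_
  | t0 :: tl =>
    let init := List.replicate (t0 :: tl).length (0 : Int)
    let p := pvLoopA n t0 (t0 :: tl) (n.toNat + 2) init 0
    let tset := pvTrimA n [] p.1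
    match tset, t0 :: tl with
    | s0 :: sTl, m0 :: mTl => pvFinA sTl mTl (s0 * m0)
    | _, _ => 0

-- ===== PORT B =====
-- `-(-t // t0)` (ceiling division exactly as written in Source B)
def pvCeil (t t0 : Int) : Int := -(PySem.Int.floordiv (-t) t0)

-- `S(X) = sum(X - ci + 1 for ci in c if ci <= X)`
def pvS (c : List Int) (X : Int) : Int :=
  ((c.filter (fun ci => ci ≤ X)).map (fun ci => X - ci + 1)).sum

-- `while lo < hi: mid = (lo + hi) // 2; …`
def pvBS (n : Int) (c : List Int) (lo hi : Int) : Int :=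
  if _h : lo < hi then
    let mid := PySem.Int.floordiv (lo + hi) 2
    if pvS c mid > n then pvBS n c lo mid else pvBS n c (mid + 1) hi
  else lo
  termination_by (hi - lo).toNat
  decreasing_by
    all_goals
      simp only [PySem.Int.floordiv_eq_ediv_of_pos (by norm_num : (0:Int) < 2)]
      omega

-- `for y in range(excess): counts[y] -= 1` (decrement the first `excess` entries)
def pvDec : List Int → Nat → List Int
  | l, 0 => l
  | [], _ + 1 => []
  | s :: tl, k + 1 => (s - 1) :: pvDec tl k

-- final loop of Source B (same break; the running max written with `max`)
def pvFinB : List Int → List Int → Int → Int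
  | s :: ss, t :: ts, total =>
    if s = 0 then total else pvFinB ss ts (max total (s * t))
  | _, _, total => total

def solution_alt (n : Int) (times : List Int) : Int :=
  if n ≤ 0 then 0  -- nobody waiting: no time needed
  else match PySem.List.sorted times (fun x => x) false with
  | [] => 0  -- Python raises IndexError on times[0]; excluded by Pre_
  | t0 :: tl =>
    let c := (t0 :: tl).map (fun t => pvCeil t t0)
    let hi := (match PySem.List.pyGet? c (-1) with | some v => v | none => 0) + n
    let X := pvBS n c 1 hi
    let counts := pvDec (c.map (fun ci => max 0 (X - ci + 1)))
                        ((c.map (fun ci => max 0 (X - ci + 1))).sum - n).toNat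
    match counts, t0 :: tl with
    | s0 :: sTl, m0 :: mTl => pvFinB sTl mTl (s0 * m0)
    | _, _ => 0

-- ===== PRECONDITION & SPEC =====
-- Pre_ is the domain on which A terminates with a value B accounts for: a nonempty desk
-- list and either n ≥ 1 with positive service times (the task's natural domain), or
-- n ≤ 0 with -n ≤ len(times).  Outside it A raises (empty times: IndexError on times[0];
-- n < -len(times): IndexError in the trim loop), diverges (a negative minimum time with
-- too large an n), or returns an artefact 0 on lists containing a service time ≤ 0,
-- where B raises ZeroDivisionError — see claim.json's cites.
def Pre_solution (n : Int) (times : List Int) : Prop :=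
  times ≠ [] ∧ ((n ≤ 0 ∧ -n ≤ (times.length : Int)) ∨ (0 < n ∧ ∀ t ∈ times, 1 ≤ t))
instance (n : Int) (times : List Int) : Decidable (Pre_solution n times) := by
  unfold Pre_solution; infer_instance

def pvWitness_solution : Int × List Int := (6, [7, 10])

-- For n < 0 (with -n ≤ len(times), and unless min(times) = 0 where both give 0) A returns
-- -min(times), a meaningless negative total produced by its trim loop decrementing
-- untouched counters; B returns 0, the intended answer when nobody is waiting.
def D_solution (n : Int) (times : List Int) : Prop :=
  n < 0 ∧ ¬(0 ∈ times ∧ ∀ t ∈ times, 0 ≤ t)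
instance (n : Int) (times : List Int) : Decidable (D_solution n times) := by
  unfold D_solution; infer_instance

def Spec_solution (n : Int) (times : List Int) (out : Int) : Prop :=
  ¬ D_solution n times → out = solution_alt n times
instance (n : Int) (times : List Int) (out : Int) : Decidable (Spec_solution n times out) := by
  unfold Spec_solution; infer_instance

def pvDiffWitness_solution : Int × List Int := (-1, [2])
def pvDiffWitnessOut_solution : Int × Int := (-2, 0)

-- ===== CLAIM (what is proved, stated in full; the proofs are below) =====
def Claim_unchanged_solution : Prop := ∀ (n : Int) (times : List Int), Dom_solution n times → Pre_solution n times → Spec_solution n times (solution n times)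
def Claim_changed_solution : Prop := Dom_solution (pvDiffWitness_solution.1) (pvDiffWitness_solution.2) ∧ Pre_solution (pvDiffWitness_solution.1) (pvDiffWitness_solution.2) ∧ D_solution (pvDiffWitness_solution.1) (pvDiffWitness_solution.2) ∧ solution (pvDiffWitness_solution.1) (pvDiffWitness_solution.2) = pvDiffWitnessOut_solution.1 ∧ solution_alt (pvDiffWitness_solution.1) (pvDiffWitness_solution.2) = pvDiffWitnessOut_solution.2 ∧ pvDiffWitnessOut_solution.1 ≠ pvDiffWitnessOut_solution.2
def Claim_exact_solution : Prop := ∀ (n : Int) (times : List Int), Dom_solution n times → Pre_solution n times → D_solution n times → solution n times ≠ solution_alt n times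

-- ===== LEMMAS AND PROOFS =====

-- ceiling division: bracket characterisation and its consequences
theorem pvCeil_bracket (t t0 : Int) (h0 : 1 ≤ t0) :
    (pvCeil t t0 - 1) * t0 < t ∧ t ≤ pvCeil t t0 * t0 :=
  (PySem.Int.neg_floordiv_neg_eq_iff_of_pos (by omega)).1 rfl

theorem pvCeil_le_iff (t t0 x : Int) (h0 : 1 ≤ t0) : pvCeil t t0 ≤ x ↔ t ≤ t0 * x := by
  obtain ⟨h1, h2⟩ := pvCeil_bracket t t0 h0
  constructor
  · intro h
    calc t ≤ pvCeil t t0 * t0 := h2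
    _ ≤ x * t0 := by exact mul_le_mul_of_nonneg_right h (by omega)
    _ = t0 * x := by ring
  · intro h
    have hlt : (pvCeil t t0 - 1) * t0 < x * t0 := by nlinarith
    have := lt_of_mul_lt_mul_right hlt (by omega : (0:Int) ≤ t0)
    omega

theorem pvCeil_pos (t t0 : Int) (h0 : 1 ≤ t0) (ht : 1 ≤ t) : 1 ≤ pvCeil t t0 := by
  obtain ⟨h1, h2⟩ := pvCeil_bracket t t0 h0
  nlinarith

theorem pvCeil_self (t0 : Int) (h0 : 1 ≤ t0) : pvCeil t0 t0 = 1 :=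
  (PySem.Int.neg_floordiv_neg_eq_iff_of_pos (by omega)).2 (by constructor <;> nlinarith)

theorem pvCeil_mono (t t' t0 : Int) (h0 : 1 ≤ t0) (h : t ≤ t') :
    pvCeil t t0 ≤ pvCeil t' t0 := by
  rw [pvCeil_le_iff _ _ _ h0]
  have h2 := (pvCeil_le_iff t' t0 (pvCeil t' t0) h0).1 le_rfl
  omega

-- S as a sum of `max 0 _` over the whole list, and its order facts
theorem pvS_eq (c : List Int) (X : Int) :
    pvS c X = (c.map (fun ci => max 0 (X - ci + 1))).sum := by
  induction c with
  | nil => rfl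
  | cons a tl ih =>
    by_cases h : a ≤ X
    · simp [pvS, h] at ih ⊢; omega
    · simp [pvS, h] at ih ⊢; omega

theorem pvS_nonneg (c : List Int) (X : Int) : 0 ≤ pvS c X := by
  rw [pvS_eq]
  induction c with
  | nil => simp
  | cons a tl ih => simp only [List.map_cons, List.sum_cons]; omega

theorem pvS_mono (c : List Int) (X Y : Int) (h : X ≤ Y) : pvS c X ≤ pvS c Y := by
  rw [pvS_eq, pvS_eq]
  exact List.sum_le_sum (fun i _ => by omega)

theorem pvS_step (c : List Int) (X : Int) : pvS c X ≤ pvS c (X - 1) + c.length := by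
  rw [pvS_eq, pvS_eq]
  induction c with
  | nil => simp
  | cons a tl ih => simp only [List.map_cons, List.sum_cons, List.length_cons]; push_cast; omega

theorem pvS_zero (c : List Int) (hc : ∀ x ∈ c, 1 ≤ x) : pvS c 0 = 0 := by
  rw [pvS_eq]
  induction c with
  | nil => rfl
  | cons a tl ih =>
    simp only [List.map_cons, List.sum_cons]
    have ha := hc a (by simp)
    have := ih (fun x hx => hc x (by simp [hx]))
    omega

theorem pvS_head_ge (c0 : Int) (rest : List Int) (X : Int) (h : c0 ≤ X) :
    X - c0 + 1 ≤ pvS (c0 :: rest) X := by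
  have := pvS_nonneg rest X
  rw [pvS_eq] at this ⊢
  simp only [List.map_cons, List.sum_cons]
  omega

-- one round of A's while-loop body turns the counter list for x into the one for x+1
theorem innerA_step (t0 x : Int) (h0 : 1 ≤ t0) :
    ∀ (ms : List Int), ms.Pairwise (· ≤ ·) →
      pvInnerA ms (ms.map (fun t => max 0 (x - pvCeil t t0 + 1))) (t0 * (x + 1)) =
        ms.map (fun t => max 0 (x + 1 - pvCeil t t0 + 1)) := by
  intro ms
  induction ms with
  | nil => intro _; rfl
  | cons t tl ih =>
    intro hp
    rw [List.pairwise_cons] at hp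
    simp only [List.map_cons, pvInnerA]
    by_cases hle : t ≤ t0 * (x + 1)
    · have hc : pvCeil t t0 ≤ x + 1 := (pvCeil_le_iff _ _ _ h0).2 hle
      rw [if_pos hle, ih hp.2]
      congr 1
      omega
    · have hc : ¬ pvCeil t t0 ≤ x + 1 := fun h => hle ((pvCeil_le_iff _ _ _ h0).1 h)
      rw [if_neg hle]
      congr 1
      · omega
      · refine List.map_congr_left (fun y hy => ?_)
        have := pvCeil_mono t y t0 h0 (hp.1 y hy)
        omega

-- A's first while-loop: from the counter list for round x it reaches the counter list for
-- the first round R whose cumulative count exceeds n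
theorem loopA_spec (n t0 : Int) (tl : List Int) (h0 : 1 ≤ t0)
    (hsort : (t0 :: tl).Pairwise (· ≤ ·)) :
    ∀ (fuel : Nat) (x : Int), 0 ≤ x →
      pvS ((t0 :: tl).map (fun t => pvCeil t t0)) x ≤ n →
      (n - x).toNat + 1 ≤ fuel →
      ∃ R, pvLoopA n t0 (t0 :: tl) fuel
            ((t0 :: tl).map (fun t => max 0 (x - pvCeil t t0 + 1))) x =
          ((t0 :: tl).map (fun t => max 0 (R - pvCeil t t0 + 1)), R) ∧ 1 ≤ R ∧
          n < pvS ((t0 :: tl).map (fun t => pvCeil t t0)) R ∧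
          pvS ((t0 :: tl).map (fun t => pvCeil t t0)) (R - 1) ≤ n := by
  have hc0 : (t0 :: tl).map (fun t => pvCeil t t0) =
      1 :: tl.map (fun t => pvCeil t t0) := by
    simp [pvCeil_self t0 h0]
  have hSx : ∀ x : Int, 0 ≤ x → x ≤ pvS ((t0 :: tl).map (fun t => pvCeil t t0)) x := by
    intro x hx
    rcases eq_or_lt_of_le hx with h | h
    · have := pvS_nonneg ((t0 :: tl).map (fun t => pvCeil t t0)) x; omega
    · rw [hc0]
      have := pvS_head_ge 1 (tl.map (fun t => pvCeil t t0)) x (by omega)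
      omega
  have hsum : ∀ y : Int, ((t0 :: tl).map (fun t => max 0 (y - pvCeil t t0 + 1))).sum =
      pvS ((t0 :: tl).map (fun t => pvCeil t t0)) y := by
    intro y
    rw [pvS_eq, List.map_map]
    rfl
  intro fuel
  induction fuel with
  | zero => intro x _ _ hf; omega
  | succ m ih =>
    intro x hx hle hf
    rw [pvLoopA, if_pos (by rw [hsum]; omega), innerA_step t0 x h0 _ hsort]
    by_cases hnext : pvS ((t0 :: tl).map (fun t => pvCeil t t0)) (x + 1) ≤ n
    · have hbound : x + 1 ≤ n := le_trans (hSx (x + 1) (by omega)) hnext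
      obtain ⟨R, hR⟩ := ih (x + 1) (by omega) hnext (by omega)
      exact ⟨R, hR.1, hR.2⟩
    · refine ⟨x + 1, ?_, by omega, by omega, by simpa using hle⟩
      cases m with
      | zero => rfl
      | succ k => rw [pvLoopA, if_neg (by rw [hsum]; omega)]

-- B's binary search finds a round with the same characterisation
theorem bs_spec (n : Int) (c : List Int) :
    ∀ (k : Nat) (lo hi : Int), (hi - lo).toNat = k → lo ≤ hi →
      pvS c (lo - 1) ≤ n → n < pvS c hi →
      n < pvS c (pvBS n c lo hi) ∧ pvS c (pvBS n c lo hi - 1) ≤ n := by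
  intro k
  induction k using Nat.strong_induction_on with
  | _ k ih =>
    intro lo hi hk hle hlo hhi
    rw [pvBS]
    rcases eq_or_lt_of_le hle with heq | hlt
    · rw [dif_neg (by omega)]
      subst heq
      exact ⟨hhi, hlo⟩
    · rw [dif_pos hlt]
      obtain ⟨hm1, hm2⟩ := PySem.Int.floordiv_two_mid_bounds hle
      have hmidlt : PySem.Int.floordiv (lo + hi) 2 < hi := by
        rw [PySem.Int.floordiv_eq_ediv_of_pos (by norm_num : (0:Int) < 2)]
        omega
      set mid := PySem.Int.floordiv (lo + hi) 2 with hmid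
      by_cases hS : pvS c mid > n
      · rw [if_pos hS]
        exact ih (mid - lo).toNat (by omega) lo mid rfl (by omega) hlo hS
      · rw [if_neg hS]
        exact ih (hi - (mid + 1)).toNat (by omega) (mid + 1) hi rfl (by omega)
          (by simpa using not_lt.1 hS) hhi

-- the characterisation is unique (S is monotone)
theorem X_unique (c : List Int) (n A B : Int) (hA1 : n < pvS c A) (hA2 : pvS c (A - 1) ≤ n)
    (hB1 : n < pvS c B) (hB2 : pvS c (B - 1) ≤ n) : A = B := by
  rcases lt_trichotomy A B with h | h | h
  · have := pvS_mono c A (B - 1) (by omega); omega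
  · exact h
  · have := pvS_mono c B (A - 1) (by omega); omega

-- A's trim loop is exactly "decrement the first (sum - n) entries"
theorem trim_eq (n : Int) :
    ∀ (rest done : List Int), 0 ≤ done.sum + rest.sum - n →
      done.sum + rest.sum - n ≤ rest.length →
      pvTrimA n done rest = done ++ pvDec rest (done.sum + rest.sum - n).toNat := by
  intro rest
  induction rest with
  | nil =>
    intro done h1 h2
    have hd : ∀ k : Nat, pvDec [] k = [] := fun k => by cases k <;> rfl
    simp [pvTrimA, hd]
  | cons s tl ih =>
    intro done h1 h2
    rw [pvTrimA]
    by_cases hcond : done.sum + (s :: tl).sum > n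
    · rw [if_pos hcond]
      simp only [List.sum_cons, List.length_cons] at h1 h2 hcond ⊢
      have := ih (done ++ [s - 1]) (by simp; omega) (by simp; omega)
      rw [this]
      have hnat : (done.sum + (s + tl.sum) - n).toNat =
          ((done ++ [s - 1]).sum + tl.sum - n).toNat + 1 := by simp; omega
      rw [hnat]
      simp [pvDec, List.append_assoc]
    · rw [if_neg hcond]
      simp only [List.sum_cons] at hcond h1 h2 ⊢
      have : (done.sum + (s + tl.sum) - n).toNat = 0 := by omega
      simp [this, pvDec]

-- the two final loops agree (`if total < v then v else total` is `max total v`)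
theorem fin_eq : ∀ (ss ts : List Int) (total : Int), pvFinA ss ts total = pvFinB ss ts total := by
  intro ss
  induction ss with
  | nil => intro ts total; cases ts <;> rfl
  | cons s sl ih =>
    intro ts total
    cases ts with
    | nil => rfl
    | cons t tll =>
      simp only [pvFinA, pvFinB]
      by_cases hs : s = 0
      · simp [hs]
      · rw [if_neg hs, if_neg hs, ih]
        congr 1
        rcases lt_or_ge total (s * t) with h | h
        · rw [if_pos h, max_eq_right (le_of_lt h)]
        · rw [if_neg (not_lt.mpr h), max_eq_left h]

-- A's initial `[0] * times_len` is the counter list for round 0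
theorem init_cvec (t0 : Int) :
    ∀ (ms : List Int), (∀ t ∈ ms, 1 ≤ pvCeil t t0) →
      List.replicate ms.length (0 : Int) = ms.map (fun t => max 0 (0 - pvCeil t t0 + 1)) := by
  intro ms
  induction ms with
  | nil => intro _; rfl
  | cons t tl ih =>
    intro h
    simp only [List.length_cons, List.replicate_succ, List.map_cons]
    have h1 := h t (by simp)
    rw [ih (fun y hy => h y (by simp [hy]))]
    congr 1
    omega

-- the n ≥ 1 case: A's simulated loop and B's binary search find the same round
theorem solution_eq_pos (n : Int) (times : List Int) (hpos : 0 < n) (hne : times ≠ [])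
    (hts : ∀ t ∈ times, 1 ≤ t) : solution n times = solution_alt n times := by
  have hn : 0 ≤ n := le_of_lt hpos
  unfold solution solution_alt
  rw [if_neg (by omega : ¬ n ≤ 0)]
  obtain ⟨t0, tl, hms⟩ : ∃ t0 tl, PySem.List.sorted times (fun x => x) false = t0 :: tl := by
    cases h : PySem.List.sorted times (fun x => x) false with
    | nil => exact absurd ((PySem.List.sorted_eq_nil_iff times (fun x => x) false).1 h) hne
    | cons a b => exact ⟨a, b, rfl⟩
  rw [hms]
  dsimp only
  -- basic facts about the sorted list
  have hmem : ∀ t ∈ t0 :: tl, 1 ≤ t := by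
    intro t ht
    exact hts t ((PySem.List.mem_sorted times (fun x => x) false t).1 (hms ▸ ht))
  have h0 : 1 ≤ t0 := hmem t0 (by simp)
  have hsort : (t0 :: tl).Pairwise (· ≤ ·) := by
    have := PySem.List.sorted_pairwise times (fun x => x)
    rw [hms] at this
    exact this
  set c := (t0 :: tl).map (fun t => pvCeil t t0) with hc
  have hcpos : ∀ x ∈ c, 1 ≤ x := by
    intro x hx
    rw [hc, List.mem_map] at hx
    obtain ⟨t, ht, rfl⟩ := hx
    exact pvCeil_pos t t0 h0 (hmem t ht)
  have hS0 : pvS c 0 ≤ n := by rw [pvS_zero c hcpos]; exact hn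
  have hchead : c = 1 :: tl.map (fun t => pvCeil t t0) := by
    rw [hc]; simp [pvCeil_self t0 h0]
  -- A's loop
  obtain ⟨R, hRrun, hR1, hRgt, hRle⟩ :=
    loopA_spec n t0 tl h0 hsort (n.toNat + 2) 0 le_rfl hS0 (by omega)
  rw [← hc] at hRgt hRle
  rw [init_cvec t0 (t0 :: tl) (fun t ht => pvCeil_pos t t0 h0 (hmem t ht))]
  rw [hRrun]
  -- B's search bound
  obtain ⟨g, hg⟩ : ∃ g, PySem.List.pyGet? c (-1) = some g := by
    rw [PySem.List.pyGet?_neg_one, hchead]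
    exact ⟨_, List.getLast?_eq_some_getLast (by simp)⟩
  have hgmem : g ∈ c := by
    rw [PySem.List.pyGet?_neg_one] at hg
    exact List.mem_of_getLast? hg
  have hg1 : 1 ≤ g := hcpos g hgmem
  have hShi : n < pvS c (g + n) := by
    have hhead := pvS_head_ge 1 (tl.map (fun t => pvCeil t t0)) (g + n) (by omega)
    rw [hchead]
    omega
  obtain ⟨hB1, hB2⟩ := bs_spec n c ((g + n) - 1).toNat 1 (g + n) rfl (by omega)
    (by simpa using hS0) hShi
  rw [hg]
  -- the two rounds coincide
  have hXeq : R = pvBS n c 1 (g + n) := X_unique c n R _ hRgt hRle hB1 hB2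
  -- identify the counter lists and the trim results
  have hmapmap : c.map (fun ci => max 0 (pvBS n c 1 (g + n) - ci + 1)) =
      (t0 :: tl).map (fun t => max 0 (pvBS n c 1 (g + n) - pvCeil t t0 + 1)) := by
    rw [hc, List.map_map]; rfl
  have hsumR : ((t0 :: tl).map (fun t => max 0 (R - pvCeil t t0 + 1))).sum = pvS c R := by
    rw [pvS_eq, hc, List.map_map]; rfl
  have hlen : ((t0 :: tl).map (fun t => max 0 (R - pvCeil t t0 + 1))).length = c.length := by
    rw [hc]; simp
  have htrim := trim_eq n ((t0 :: tl).map (fun t => max 0 (R - pvCeil t t0 + 1))) []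
    (by rw [List.sum_nil, zero_add, hsumR]; omega)
    (by
      have hstep := pvS_step c R
      rw [List.sum_nil, zero_add, hsumR, hlen]
      omega)
  simp only [List.sum_nil, zero_add, List.nil_append] at htrim
  rw [htrim, hmapmap, ← hXeq, hsumR]
  -- both sides now decompose the same decremented list
  obtain ⟨s0, sTl, hdec⟩ : ∃ s0 sTl,
      pvDec ((t0 :: tl).map (fun t => max 0 (R - pvCeil t t0 + 1))) ((pvS c R - n).toNat) =
        s0 :: sTl := by
    simp only [List.map_cons]
    cases hk : (pvS c R - n).toNat with
    | zero => exact ⟨_, _, rfl⟩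
    | succ k => exact ⟨_, _, rfl⟩
  rw [hdec]
  exact fin_eq sTl tl (s0 * t0)

-- the first round from all-zero counters: the break marks off a prefix of ones
theorem innerA_zero : ∀ (ms : List Int) (ct : Int), ∃ k : Nat, k ≤ ms.length ∧
    pvInnerA ms (List.replicate ms.length (0 : Int)) ct =
      List.replicate k 1 ++ List.replicate (ms.length - k) 0 ∧
    (∀ t0 tl, ms = t0 :: tl → t0 ≤ ct → 1 ≤ k) := by
  intro ms
  induction ms with
  | nil => exact fun ct => ⟨0, Nat.le_refl 0, rfl, by simp⟩
  | cons t tl ih =>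
    intro ct
    by_cases hle : t ≤ ct
    · obtain ⟨k, hk1, hk2, _⟩ := ih ct
      refine ⟨k + 1, by simp; omega, ?_, fun _ _ _ _ => by omega⟩
      simp only [List.length_cons, List.replicate_succ, pvInnerA, if_pos hle, hk2]
      simp
    · refine ⟨0, by simp, ?_, fun t0 tl' heq h0 => ?_⟩
      · simp only [List.length_cons, List.replicate_succ, pvInnerA, if_neg hle]
        simp only [List.replicate_zero, List.nil_append, Nat.sub_zero]
        rw [List.replicate_succ]
      · cases heq; exact absurd h0 hle

theorem sum_ones_zeros (k j : Nat) :
    (List.replicate k (1 : Int) ++ List.replicate j 0).sum = (k : Int) := by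
  simp [List.sum_replicate]

theorem pvDec_ones : ∀ (k j : Nat),
    pvDec (List.replicate k (1 : Int) ++ List.replicate j 0) k = List.replicate (k + j) 0 := by
  intro k
  induction k with
  | zero => intro j; simp [pvDec]
  | succ m ih =>
    intro j
    simp only [List.replicate_succ, List.cons_append, pvDec, ih]
    have : m + 1 + j = (m + j) + 1 := by omega
    rw [this, List.replicate_succ]
    norm_num

theorem pvDec_zeros : ∀ (e L : Nat), e ≤ L →
    pvDec (List.replicate L (0 : Int)) e =
      List.replicate e (-1) ++ List.replicate (L - e) 0 := by
  intro e
  induction e with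
  | zero => intro L _; simp [pvDec]
  | succ m ih =>
    intro L hL
    obtain ⟨L', rfl⟩ : ∃ L', L = L' + 1 := ⟨L - 1, by omega⟩
    simp only [List.replicate_succ, pvDec, ih L' (by omega)]
    simp

theorem finA_zeros : ∀ (j : Nat) (ms : List Int) (total : Int),
    pvFinA (List.replicate j 0) ms total = total := by
  intro j ms total
  cases j <;> cases ms <;> simp [pvFinA, List.replicate_succ]

theorem finA_stay : ∀ (ss ms : List Int) (total : Int),
    (∀ p ∈ ss, p = -1 ∨ p = 0) → (∀ t ∈ ms, -t ≤ total) → pvFinA ss ms total = total := by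
  intro ss
  induction ss with
  | nil => intro ms total _ _; cases ms <;> rfl
  | cons s sl ih =>
    intro ms total hp ht
    cases ms with
    | nil => rfl
    | cons t tll =>
      rcases hp s (by simp) with hs | hs
      · rw [hs]
        simp only [pvFinA, if_neg (by omega : ¬ (-1 : Int) = 0)]
        have htt : -t ≤ total := ht t (by simp)
        rw [if_neg (by omega : ¬ total < -1 * t)]
        exact ih tll total (fun p hp' => hp p (by simp [hp'])) (fun y hy => ht y (by simp [hy]))
      · rw [hs]
        simp [pvFinA]

-- A at n = 0 returns 0 (for every nonempty list, of any sign)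
theorem solution_zero (times : List Int) (hne : times ≠ []) : solution 0 times = 0 := by
  unfold solution
  obtain ⟨t0, tl, hms⟩ : ∃ t0 tl, PySem.List.sorted times (fun x => x) false = t0 :: tl := by
    cases h : PySem.List.sorted times (fun x => x) false with
    | nil => exact absurd ((PySem.List.sorted_eq_nil_iff times (fun x => x) false).1 h) hne
    | cons a b => exact ⟨a, b, rfl⟩
  rw [hms]
  dsimp only
  simp only [List.length_cons]
  obtain ⟨k, hk1, hk2, hk3⟩ := innerA_zero (t0 :: tl) (t0 * (0 + 1))
  have hkpos : 1 ≤ k := hk3 t0 tl rfl (by omega)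
  simp only [List.length_cons] at hk1 hk2
  rw [show ((0 : Int).toNat + 2) = 2 from rfl, pvLoopA,
    if_pos (by simp : (0:Int) ≥ (List.replicate (tl.length + 1) (0:Int)).sum), hk2, pvLoopA,
    if_neg (by rw [sum_ones_zeros]; omega)]
  have htrim := trim_eq 0 (List.replicate k (1:Int) ++ List.replicate (tl.length + 1 - k) 0) []
    (by rw [List.sum_nil, zero_add, sum_ones_zeros]; omega)
    (by rw [List.sum_nil, zero_add, sum_ones_zeros]; simp; try omega)
  simp only [List.sum_nil, zero_add, List.nil_append, sum_ones_zeros, sub_zero,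
    Int.toNat_natCast] at htrim
  rw [htrim, pvDec_ones]
  have hkl : k + (tl.length + 1 - k) = tl.length + 1 := by omega
  rw [hkl, List.replicate_succ]
  dsimp only
  rw [finA_zeros, zero_mul]

-- A at n < 0 (with -n ≤ len) returns minus the smallest time
theorem solution_neg (n : Int) (times : List Int) (t0 : Int) (tl : List Int)
    (hms : PySem.List.sorted times (fun x => x) false = t0 :: tl)
    (hn : n < 0) (hlen : -n ≤ ((t0 :: tl).length : Int)) : solution n times = -t0 := by
  have hsort : (t0 :: tl).Pairwise (· ≤ ·) := by
    have := PySem.List.sorted_pairwise times (fun x => x)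
    rw [hms] at this
    exact this
  simp only [List.length_cons] at hlen
  unfold solution
  rw [hms]
  dsimp only
  simp only [List.length_cons]
  rw [show n.toNat + 2 = 2 from by omega, pvLoopA, if_neg (by simp; omega)]
  have htrim := trim_eq n (List.replicate (tl.length + 1) (0:Int)) []
    (by simp; omega) (by simp; omega)
  simp only [List.sum_nil, zero_add, List.nil_append, List.sum_replicate, smul_zero] at htrim
  rw [htrim, pvDec_zeros (0 - n).toNat (tl.length + 1) (by simp; omega)]
  obtain ⟨e', he⟩ : ∃ e', (0 - n).toNat = e' + 1 := ⟨(0 - n).toNat - 1, by omega⟩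
  rw [he, List.replicate_succ, List.cons_append]
  dsimp only
  rw [finA_stay]
  · omega
  · intro p hp
    rcases List.mem_append.1 hp with h | h
    · left; exact List.eq_of_mem_replicate h
    · right; exact List.eq_of_mem_replicate h
  · intro t ht
    rw [List.pairwise_cons] at hsort
    have := hsort.1 t ht
    omega

-- elements of the sorted list are exactly the elements of times, and the head is least
theorem sorted_head_least (times : List Int) (t0 : Int) (tl : List Int)
    (hms : PySem.List.sorted times (fun x => x) false = t0 :: tl) :
    t0 ∈ times ∧ ∀ t ∈ times, t0 ≤ t := by
  have hsort : (t0 :: tl).Pairwise (· ≤ ·) := by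
    have := PySem.List.sorted_pairwise times (fun x => x)
    rw [hms] at this
    exact this
  constructor
  · exact (PySem.List.mem_sorted times (fun x => x) false t0).1 (hms ▸ by simp)
  · intro t ht
    have : t ∈ t0 :: tl := hms ▸ (PySem.List.mem_sorted times (fun x => x) false t).2 ht
    rw [List.mem_cons] at this
    rcases this with rfl | hmem
    · exact le_rfl
    · rw [List.pairwise_cons] at hsort
      exact hsort.1 t hmem

-- ===== VERDICT (by name: the statements are the Claim_ definitions above) =====
theorem solution_spec : Claim_unchanged_solution := by
  intro n times _ hPre hnD
  obtain ⟨hne, hcase⟩ := hPre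
  rcases hcase with ⟨hn0, hlen⟩ | ⟨hpos, hts⟩
  · -- n ≤ 0 : B returns 0
    unfold solution_alt
    rw [if_pos hn0]
    rcases eq_or_lt_of_le hn0 with heq | hlt
    · rw [heq] at *
      exact solution_zero times hne
    · obtain ⟨t0, tl, hms⟩ : ∃ t0 tl, PySem.List.sorted times (fun x => x) false = t0 :: tl := by
        cases h : PySem.List.sorted times (fun x => x) false with
        | nil => exact absurd ((PySem.List.sorted_eq_nil_iff times (fun x => x) false).1 h) hne
        | cons a b => exact ⟨a, b, rfl⟩
      have hD0 : 0 ∈ times ∧ ∀ t ∈ times, 0 ≤ t := by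
        by_contra h
        exact hnD ⟨hlt, h⟩
      obtain ⟨hmem0, hall⟩ := hD0
      obtain ⟨hhead, hleast⟩ := sorted_head_least times t0 tl hms
      have ht0 : t0 = 0 := le_antisymm (hleast 0 hmem0) (hall t0 hhead)
      have hlen' : -n ≤ ((t0 :: tl).length : Int) := by
        have : (t0 :: tl).length = times.length := by
          rw [← hms]; exact PySem.List.length_sorted times (fun x => x) false
        omega
      rw [solution_neg n times t0 tl hms hlt hlen', ht0]
      rfl
  · exact solution_eq_pos n times hpos hne hts

theorem solution_changed : Claim_changed_solution := by
  unfold Claim_changed_solution; decide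

theorem solution_tight : Claim_exact_solution := by
  intro n times _ hPre hD
  obtain ⟨hne, hcase⟩ := hPre
  obtain ⟨hn, hD2⟩ := hD
  rcases hcase with ⟨hn0, hlen⟩ | ⟨hpos, _⟩
  · obtain ⟨t0, tl, hms⟩ : ∃ t0 tl, PySem.List.sorted times (fun x => x) false = t0 :: tl := by
      cases h : PySem.List.sorted times (fun x => x) false with
      | nil => exact absurd ((PySem.List.sorted_eq_nil_iff times (fun x => x) false).1 h) hne
      | cons a b => exact ⟨a, b, rfl⟩
    have hlen' : -n ≤ ((t0 :: tl).length : Int) := by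
      have : (t0 :: tl).length = times.length := by
        rw [← hms]; exact PySem.List.length_sorted times (fun x => x) false
      omega
    rw [solution_neg n times t0 tl hms hn hlen']
    obtain ⟨hhead, hleast⟩ := sorted_head_least times t0 tl hms
    have ht0 : t0 ≠ 0 := by
      intro h0
      exact hD2 ⟨h0 ▸ hhead, fun t ht => h0 ▸ hleast t ht⟩
    unfold solution_alt
    rw [if_pos (by omega)]
    omega
  · omega
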